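-- pv_equiv track=rewrite | github.com/qhoa256/PYTHON-CODEPTIT | DOI TUONG/PYKT097_CHUAN_HOA_CAU.py | solve
-- ===== SOURCE A (Python) =====
-- def solve(s):
--     res = ""
--     a = s.split()
--     for x in a:
--         res += x + " "
--     res = res.strip()
--     res = res.replace(' ?', '?')
--     res = res.replace(' .', '.')
--     res = res.replace(' !', '!')
--     if not res.endswith(('.', '!', '?')): res += '.'
--     return res.capitalize().strip()
-- ===== SOURCE B (Python) =====
-- def solve(s):
--     # single character-level pass: collapse whitespace runs, dropping a pending
--     # separator space when the next character is '.', '!' or '?'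
--     out = []
--     pending = False
--     for ch in s:
--         if ch.isspace():
--             pending = bool(out)
--         else:
--             if pending and ch not in '.!?':
--                 out.append(' ')
--             pending = False
--             out.append(ch)
--     if not out or out[-1] not in '.!?':
--         out.append('.')
--     r = ''.join(out)
--     return r[0].upper() + r[1:].lower()
-- ===== Notes on version B (the rewrite author's own statement) =====
-- stated objective: alternative
-- what changed: Replaces A's split/join pass plus three whole-string str.replace passes with a single character-level scan that collapses whitespace runs and suppresses the pending separator space when the next character is sentence-terminating punctuation.
import Mathlib
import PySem

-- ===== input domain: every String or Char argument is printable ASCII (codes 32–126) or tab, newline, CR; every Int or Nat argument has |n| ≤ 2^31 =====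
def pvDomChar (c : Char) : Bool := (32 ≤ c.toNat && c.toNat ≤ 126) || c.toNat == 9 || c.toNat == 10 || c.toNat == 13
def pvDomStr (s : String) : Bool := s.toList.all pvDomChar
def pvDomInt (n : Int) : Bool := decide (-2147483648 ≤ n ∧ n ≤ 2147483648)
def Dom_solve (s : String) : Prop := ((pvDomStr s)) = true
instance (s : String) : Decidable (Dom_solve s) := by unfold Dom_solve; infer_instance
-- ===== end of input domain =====

-- B rewrites A's split/join plus three global replaces as one character-level pass
-- (objective: alternative decomposition, same cost).

-- ===== PORT A =====
-- Python str.capitalize: first character upper-cased, the rest lower-cased (exact on ASCII)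
def pyCapitalize : List Char → List Char
  | [] => []
  | c :: t => PySem.Chars.upperChar c :: PySem.Chars.lower t

def solve (s : String) : String :=
  let a := PySem.Chars.split₀ s.toList
  let res1 := a.foldl (fun r x => r ++ x ++ [' ']) ([] : List Char)
  let res2 := PySem.Chars.strip res1
  let res3 := PySem.Chars.replace res2 [' ', '?'] ['?']
  let res4 := PySem.Chars.replace res3 [' ', '.'] ['.']
  let res5 := PySem.Chars.replace res4 [' ', '!'] ['!']
  let res6 := if !(PySem.Chars.endswith res5 ['.'] || PySem.Chars.endswith res5 ['!'] ||
                   PySem.Chars.endswith res5 ['?'])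
              then res5 ++ ['.'] else res5
  String.ofList (PySem.Chars.strip (pyCapitalize res6))

-- ===== PORT B =====
-- one character step of B's single pass: st = (out, pending)
def stepB (st : List Char × Bool) (ch : Char) : List Char × Bool :=
  if PySem.Chars.isspace ch then (st.1, !st.1.isEmpty)
  else if st.2 && !(ch == '.' || ch == '!' || ch == '?') then (st.1 ++ [' ', ch], false)
  else (st.1 ++ [ch], false)

def solve_alt (s : String) : String :=
  let out := (s.toList.foldl stepB ([], false)).1
  let out2 :=
    match out.getLast? with
    | none => out ++ ['.']
    | some c => if c == '.' || c == '!' || c == '?' then out else out ++ ['.']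
  match out2 with
  | [] => ""
  | c :: t => String.ofList (PySem.Chars.upperChar c :: PySem.Chars.lower t)

-- ===== PRECONDITION & SPEC =====
def Spec_solve (s : String) (out : String) : Prop := out = solve_alt s
instance (s : String) (out : String) : Decidable (Spec_solve s out) := by unfold Spec_solve; infer_instance

-- ===== CLAIM (what is proved, stated in full; the proofs are below) =====
def Claim_equal_solve : Prop := ∀ (s : String), Dom_solve s → Spec_solve s (solve s)

-- ===== LEMMAS AND PROOFS =====

-- B's punctuation test
def punctB (c : Char) : Bool := c == '.' || c == '!' || c == '?'

-- reference form of Python str.split() (current token accumulated reversed)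
def mySplit : List Char → List Char → List (List Char)
  | [], cur => if cur.isEmpty then [] else [cur.reverse]
  | c :: rest, cur =>
    if PySem.Chars.isspace c then
      if cur.isEmpty then mySplit rest [] else cur.reverse :: mySplit rest []
    else mySplit rest (c :: cur)

-- glue tokens: a separator space before each later token unless f holds of its first char
def gTail (f : Char → Bool) : List (List Char) → List Char
  | [] => []
  | t :: ts => (if f t.headI then [] else [' ']) ++ t ++ gTail f ts

def glueF (f : Char → Bool) : List (List Char) → List Char
  | [] => []
  | t :: ts => t ++ gTail f ts

-- reference form of res.replace(' '+p, p)
def myRep (p : Char) : List Char → List Char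
  | [] => []
  | c :: t =>
    if ([' ', p]).isPrefixOf (c :: t) then p :: myRep p (t.drop 1)
    else c :: myRep p t
  termination_by l => l.length
  decreasing_by all_goals simp

-- reference form of B's emitter after/before the first token
def tailEmit : List Char → Bool → List Char
  | [], _ => []
  | c :: rest, p =>
    if PySem.Chars.isspace c then tailEmit rest true
    else (if p && !(c == '.' || c == '!' || c == '?') then [' ', c] else [c]) ++ tailEmit rest false

def lead : List Char → List Char
  | [] => []
  | c :: rest => if PySem.Chars.isspace c then lead rest else c :: tailEmit rest false

def good (toks : List (List Char)) : Prop :=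
  ∀ t ∈ toks, t ≠ [] ∧ ∀ c ∈ t, PySem.Chars.isspace c = false

-- ---- split₀ characterization ----
lemma split₀_go_eq : ∀ (cs cur : List Char) (acc : List (List Char)),
    PySem.Chars.split₀.go cs cur acc = acc.reverse ++ mySplit cs cur := by
  intro cs
  induction cs with
  | nil =>
    intro cur acc
    rw [PySem.Chars.split₀.go]
    by_cases h : cur.isEmpty <;> simp [mySplit, h]
  | cons c rest ih =>
    intro cur acc
    rw [PySem.Chars.split₀.go]
    by_cases hws : PySem.Chars.isspace c = true
    · by_cases h : cur.isEmpty <;> simp [mySplit, hws, h, ih]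
    · simp at hws
      simp [mySplit, hws, ih]

lemma split₀_eq (cs : List Char) : PySem.Chars.split₀ cs = mySplit cs [] := by
  simpa using split₀_go_eq cs [] []

lemma mySplit_good : ∀ (cs cur : List Char),
    (∀ c ∈ cur, PySem.Chars.isspace c = false) → good (mySplit cs cur) := by
  intro cs
  induction cs with
  | nil =>
    intro cur hc
    by_cases h : cur.isEmpty
    · simp [good, mySplit, h]
    · intro t ht
      simp [mySplit, h] at ht
      subst ht
      constructor
      · simpa [List.isEmpty_iff] using h
      · intro c hcmem; exact hc c (by simpa using hcmem)
  | cons c rest ih =>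
    intro cur hc
    by_cases hws : PySem.Chars.isspace c = true
    · by_cases h : cur.isEmpty
      · simpa [mySplit, hws, h] using ih [] (by simp)
      · intro t ht
        simp [mySplit, hws, h] at ht
        rcases ht with ht | ht
        · subst ht
          exact ⟨by simpa [List.isEmpty_iff] using h, fun c hcm => hc c (by simpa using hcm)⟩
        · exact ih [] (by simp) t ht
    · simp at hws
      rw [show mySplit (c :: rest) cur = mySplit rest (c :: cur) by simp [mySplit, hws]]
      exact ih (c :: cur) (by
        intro d hd
        rcases List.mem_cons.mp hd with h | h
        · subst h; exact hws
        · exact hc d h)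

-- ---- replace characterization ----
lemma replace_go_eq (p : Char) : ∀ (fuel : Nat) (l acc : List Char), l.length ≤ fuel →
    PySem.Chars.replace.go [' ', p] [p] fuel l acc = acc.reverse ++ myRep p l := by
  intro fuel
  induction fuel with
  | zero =>
    intro l acc hl
    have : l = [] := by
      cases l with
      | nil => rfl
      | cons a b => simp at hl
    subst this
    rw [PySem.Chars.replace.go]
    simp [myRep]
  | succ n ih =>
    intro l acc hl
    cases l with
    | nil =>
      rw [PySem.Chars.replace.go]
      simp [myRep]
      try omega
    | cons c t =>
      rw [PySem.Chars.replace.go]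
      by_cases hp : ([' ', p]).isPrefixOf (c :: t) = true
      · simp only [hp, if_pos]
        have hdrop : List.drop ([' ', p].length) (c :: t) = t.drop 1 := by simp
        rw [hdrop, show [p].reverse ++ acc = p :: acc by simp]
        rw [ih (t.drop 1) (p :: acc) (by simp at hl ⊢; omega)]
        simp [myRep, hp]
      · simp only [hp]
        simp only [Bool.false_eq_true, if_neg, ite_false]
        rw [ih t (c :: acc) (by simp at hl ⊢; omega)]
        simp [myRep, hp]

lemma replace_eq (p : Char) (l : List Char) :
    PySem.Chars.replace l [' ', p] [p] = myRep p l := by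
  rw [PySem.Chars.replace]
  simpa using replace_go_eq p l.length l [] le_rfl

-- replace walks through a whitespace-free block unchanged
lemma myRep_token (p : Char) : ∀ (t rest : List Char),
    (∀ c ∈ t, PySem.Chars.isspace c = false) →
    myRep p (t ++ rest) = t ++ myRep p rest := by
  intro t
  induction t with
  | nil => intro rest _; simp
  | cons c t' ih =>
    intro rest hc
    have hcns : PySem.Chars.isspace c = false := hc c (by simp)
    have hne : (' ' == c) = false := by
      by_cases h : c = ' '
      · subst h; exact absurd hcns (by decide)
      · exact beq_eq_false_iff_ne.mpr (fun hh => h hh.symm)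
    have hpre : ([' ', p]).isPrefixOf (c :: (t' ++ rest)) = false := by
      simp [List.isPrefixOf, hne]
    rw [List.cons_append, myRep, if_neg (by simp [hpre])]
    rw [ih rest (fun d hd => hc d (by simp [hd]))]
    simp

lemma myRep_gTail (p : Char) (hp : PySem.Chars.isspace p = false) :
    ∀ (ts : List (List Char)) (f : Char → Bool), good ts →
    myRep p (gTail f ts) = gTail (fun c => f c || c == p) ts := by
  intro ts
  induction ts with
  | nil => intro f _; simp [gTail, myRep]
  | cons u us ih =>
    intro f hg
    obtain ⟨hune, huns⟩ := hg u (by simp)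
    have hgus : good us := fun t ht => hg t (by simp [ht])
    obtain ⟨h, u', rfl⟩ : ∃ h u', u = h :: u' := by
      cases u with
      | nil => exact absurd rfl hune
      | cons a b => exact ⟨a, b, rfl⟩
    have hhns : PySem.Chars.isspace h = false := huns h (by simp)
    by_cases hf : f (h :: u').headI = true
    · -- no separator space before this token
      simp only [gTail, hf, Bool.true_or, ite_true, List.nil_append]
      rw [myRep_token p (h :: u') (gTail f us) huns, ih f hgus]
    · simp only [Bool.not_eq_true] at hf
      simp only [gTail, hf, Bool.false_eq_true, if_neg, ite_false]
      by_cases hhp : h = p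
      · -- ' ' :: p :: … : the space is removed
        subst hhp
        simp only [List.append_assoc, List.singleton_append, List.cons_append, List.nil_append]
        have hpre : ([' ', h]).isPrefixOf (' ' :: h :: (u' ++ gTail f us)) = true := by
          simp [List.isPrefixOf]
        simp only [myRep]
        rw [if_pos hpre]
        simp only [List.drop_succ_cons, List.drop_zero]
        rw [myRep_token h u' (gTail f us) (fun d hd => huns d (by simp [hd])), ih f hgus]
        have hsep : ((h :: u').headI == h) = true := by simp
        rw [hsep]
        simp
      · have hbeq : ((h :: u').headI == p) = false :=
          beq_eq_false_iff_ne.mpr (by simpa using hhp)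
        simp only [List.append_assoc, List.singleton_append, List.cons_append, List.nil_append]
        have hpre : ([' ', p]).isPrefixOf (' ' :: h :: (u' ++ gTail f us)) = false := by
          have hpb : (p == h) = false := beq_eq_false_iff_ne.mpr (fun h2 => hhp h2.symm)
          simp [List.isPrefixOf, hpb]
        simp only [myRep]
        rw [if_neg (Bool.eq_false_iff.mp hpre)]
        have hpre2 : ([' ', p]).isPrefixOf (h :: (u' ++ gTail f us)) = false := by
          simp [List.isPrefixOf]
          intro e
          rw [← e] at hhns
          exact absurd hhns (by decide)
        rw [if_neg (Bool.eq_false_iff.mp hpre2)]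
        rw [myRep_token p u' (gTail f us) (fun d hd => huns d (by simp [hd])), ih f hgus]
        rw [hbeq]
        simp

lemma myRep_glueF (p : Char) (hp : PySem.Chars.isspace p = false)
    (toks : List (List Char)) (f : Char → Bool) (hg : good toks) :
    myRep p (glueF f toks) = glueF (fun c => f c || c == p) toks := by
  cases toks with
  | nil => simp [glueF, myRep]
  | cons t ts =>
    obtain ⟨htne, htns⟩ := hg t (by simp)
    simp only [glueF]
    rw [myRep_token p t (gTail f ts) htns,
        myRep_gTail p hp ts f (fun u hu => hg u (by simp [hu]))]

lemma gTail_congr : ∀ (ts : List (List Char)) (f g : Char → Bool),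
    (∀ c, f c = g c) → gTail f ts = gTail g ts := by
  intro ts
  induction ts with
  | nil => intro f g _; rfl
  | cons t ts ih => intro f g h; simp [gTail, h, ih f g h]

lemma glueF_congr (toks : List (List Char)) (f g : Char → Bool)
    (h : ∀ c, f c = g c) : glueF f toks = glueF g toks := by
  cases toks with
  | nil => rfl
  | cons t ts => simp [glueF, gTail_congr ts f g h]

-- ---- join-with-trailing-space vs glue with no suppression ----
lemma gTail_false_append : ∀ (ts : List (List Char)),
    gTail (fun _ => false) ts ++ [' '] = ' ' :: ts.flatMap (fun t => t ++ [' ']) := by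
  intro ts
  induction ts with
  | nil => simp [gTail]
  | cons u us ih => simp [gTail, List.flatMap_cons, ← ih]

lemma flatMap_glue (toks : List (List Char)) (h : toks ≠ []) :
    toks.flatMap (fun t => t ++ [' ']) = glueF (fun _ => false) toks ++ [' '] := by
  cases toks with
  | nil => exact absurd rfl h
  | cons t ts => simp [glueF, List.flatMap_cons, gTail_false_append ts]

-- ---- strip pieces ----
lemma lstrip_cons (c : Char) (t : List Char) (hc : PySem.Chars.isspace c = false) :
    PySem.Chars.lstrip (c :: t) = c :: t := by
  simp [PySem.Chars.lstrip, List.dropWhile_cons, hc]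

lemma rstrip_concat (l : List Char) (d : Char) (hd : PySem.Chars.isspace d = false) :
    PySem.Chars.rstrip (l ++ [d]) = l ++ [d] := by
  simp [PySem.Chars.rstrip, List.dropWhile_cons, hd]

lemma rstrip_eq_self (l : List Char)
    (h : ∀ d, l.getLast? = some d → PySem.Chars.isspace d = false) :
    PySem.Chars.rstrip l = l := by
  rcases List.eq_nil_or_concat l with rfl | ⟨l', d, rfl⟩
  · rfl
  · simp only [List.concat_eq_append] at h ⊢
    exact rstrip_concat l' d (h d (by simp))

lemma rstrip_concat_space (l : List Char) (d : Char) (hd : PySem.Chars.isspace d = false) :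
    PySem.Chars.rstrip ((l ++ [d]) ++ [' ']) = l ++ [d] := by
  simp [PySem.Chars.rstrip, List.dropWhile_cons, hd]
  decide

-- last character of a glued good token list is not whitespace
lemma glueF_last (f : Char → Bool) : ∀ (toks : List (List Char)), good toks → toks ≠ [] →
    ∃ l c, glueF f toks = l ++ [c] ∧ PySem.Chars.isspace c = false := by
  intro toks
  induction toks with
  | nil => intro _ h; exact absurd rfl h
  | cons t ts ih =>
    intro hg _
    obtain ⟨htne, htns⟩ := hg t (by simp)
    cases ts with
    | nil =>
      rcases List.eq_nil_or_concat t with rfl | ⟨t', c, rfl⟩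
      · exact absurd rfl htne
      · exact ⟨t', c, by simp [glueF, gTail], htns c (by simp)⟩
    | cons u us =>
      obtain ⟨l, c, hlc, hcns⟩ := ih (fun v hv => hg v (by simp [hv])) (by simp)
      refine ⟨t ++ (if f u.headI then [] else [' ']) ++ l, c, ?_, hcns⟩
      have : glueF f (t :: u :: us) = t ++ (if f u.headI then [] else [' ']) ++ glueF f (u :: us) := by
        simp [glueF, gTail]
      rw [this, hlc]
      simp

-- ---- B's fold characterization ----
lemma foldB_ne : ∀ (cs : List Char) (out : List Char) (p : Bool), out ≠ [] →
    (cs.foldl stepB (out, p)).1 = out ++ tailEmit cs p := by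
  intro cs
  induction cs with
  | nil => intro out p _; simp [tailEmit]
  | cons c rest ih =>
    intro out p hout
    by_cases hws : PySem.Chars.isspace c = true
    · have hne : out.isEmpty = false := by simpa [List.isEmpty_iff] using hout
      simp only [List.foldl_cons, stepB, hws, if_pos, hne, Bool.not_false]
      rw [ih out true hout]
      simp [tailEmit, hws]
    · simp at hws
      simp only [List.foldl_cons, stepB]
      rw [if_neg (by simp [hws])]
      by_cases hpp : (p && !(c == '.' || c == '!' || c == '?')) = true
      · rw [if_pos hpp]
        rw [ih (out ++ [' ', c]) false (by simp)]
        have ht : tailEmit (c :: rest) p = [' ', c] ++ tailEmit rest false := by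
          simp only [tailEmit]
          rw [if_neg (by simp [hws]), if_pos hpp]
        rw [ht]
        simp
      · rw [if_neg hpp]
        rw [ih (out ++ [c]) false (by simp)]
        have ht : tailEmit (c :: rest) p = [c] ++ tailEmit rest false := by
          simp only [tailEmit]
          rw [if_neg (by simp [hws]), if_neg hpp]
        rw [ht]
        simp

lemma foldB_nil : ∀ (cs : List Char), (cs.foldl stepB ([], false)).1 = lead cs := by
  intro cs
  induction cs with
  | nil => simp [lead]
  | cons c rest ih =>
    by_cases hws : PySem.Chars.isspace c = true
    · simp only [List.foldl_cons, stepB, hws, if_pos]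
      simpa [lead, hws] using ih
    · simp at hws
      simp only [List.foldl_cons, stepB, hws, Bool.false_eq_true, if_neg, ite_false,
        Bool.false_and, List.nil_append]
      rw [foldB_ne rest [c] false (by simp)]
      simp [lead, hws]

-- ---- glue of the split = B's single-pass emission ----
lemma headI_append_ne {α : Type} [Inhabited α] (l r : List α) (h : l ≠ []) :
    (l ++ r).headI = l.headI := by
  cases l with
  | nil => exact absurd rfl h
  | cons a t => rfl

lemma gTail_mySplit : ∀ (cs cur : List Char),
    gTail punctB (mySplit cs cur) =
      if cur.isEmpty then tailEmit cs true
      else (if punctB cur.reverse.headI then [] else [' ']) ++ cur.reverse ++ tailEmit cs false := by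
  intro cs
  induction cs with
  | nil =>
    intro cur
    by_cases h : cur.isEmpty <;> simp [mySplit, h, gTail, tailEmit]
  | cons c rest ih =>
    intro cur
    by_cases hws : PySem.Chars.isspace c = true
    · by_cases h : cur.isEmpty
      · simp [mySplit, hws, h, tailEmit, ih []]
      · simp only [mySplit, hws, if_pos, h, Bool.false_eq_true, if_neg, ite_false]
        simp only [gTail, h]
        have := ih []
        simp only [List.isEmpty_nil, if_pos] at this
        simp [this, tailEmit, hws]
    · simp at hws
      simp only [mySplit, hws, Bool.false_eq_true, if_neg, ite_false]
      rw [ih (c :: cur)]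
      simp only [List.isEmpty_cons, Bool.false_eq_true, if_neg, ite_false, List.reverse_cons]
      by_cases h : cur.isEmpty
      · have hc : cur = [] := by simpa [List.isEmpty_iff] using h
        subst hc
        simp only [List.reverse_nil, List.nil_append, List.isEmpty_nil, if_pos, List.headI]
        have ht : tailEmit (c :: rest) true =
            (if !(c == '.' || c == '!' || c == '?') then [' ', c] else [c]) ++ tailEmit rest false := by
          simp only [tailEmit]
          rw [if_neg (by simp [hws])]
          simp
        rw [ht]
        by_cases hpc : (c == '.' || c == '!' || c == '?') = true
        · have hp1 : punctB c = true := hpc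
          simp only [hp1]
          simp [hpc]
        · have hpc' : (c == '.' || c == '!' || c == '?') = false := Bool.eq_false_iff.mpr hpc
          have hp1 : punctB c = false := hpc'
          simp only [hp1]
          simp [hpc']
      · have hcne : cur ≠ [] := by simpa [List.isEmpty_iff] using h
        have hrne : cur.reverse ≠ [] := by simpa using hcne
        simp only [h, Bool.false_eq_true, if_neg, ite_false]
        rw [headI_append_ne _ _ hrne]
        simp [tailEmit, hws]

lemma glueF_mySplit : ∀ (cs cur : List Char),
    glueF punctB (mySplit cs cur) =
      if cur.isEmpty then lead cs else cur.reverse ++ tailEmit cs false := by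
  intro cs
  induction cs with
  | nil =>
    intro cur
    by_cases h : cur.isEmpty <;> simp [mySplit, h, glueF, gTail, lead, tailEmit]
  | cons c rest ih =>
    intro cur
    by_cases hws : PySem.Chars.isspace c = true
    · by_cases h : cur.isEmpty
      · simp [mySplit, hws, h, lead, ih []]
      · simp only [mySplit, hws, if_pos, h, Bool.false_eq_true, if_neg, ite_false]
        simp only [glueF]
        have := gTail_mySplit rest []
        simp only [List.isEmpty_nil, if_pos] at this
        simp [this, tailEmit, hws]
    · simp at hws
      simp only [mySplit, hws, Bool.false_eq_true, if_neg, ite_false]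
      rw [ih (c :: cur)]
      simp only [List.isEmpty_cons, Bool.false_eq_true, if_neg, ite_false, List.reverse_cons]
      by_cases h : cur.isEmpty
      · have : cur = [] := by simpa [List.isEmpty_iff] using h
        subst this
        simp [lead, hws]
      · simp [h, tailEmit, hws]

-- ---- terminal punctuation test ----
lemma endswith_concat (l : List Char) (d c : Char) :
    PySem.Chars.endswith (l ++ [d]) [c] = (c == d) := by
  simp [PySem.Chars.endswith, List.isSuffixOf, List.isPrefixOf]

-- ---- character-class facts for capitalize ----
lemma toNat_ofNat_ascii (n : Nat) (h1 : 32 ≤ n) (h2 : n ≤ 126) : (Char.ofNat n).toNat = n := by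
  have hv : n.isValidChar := Or.inl (by omega)
  rw [Char.ofNat, dif_pos hv]
  simp only [Char.ofNatAux, Char.toNat]
  simp [UInt32.toNat, BitVec.toNat_ofNatLT]

lemma isspace_upperChar (c : Char) (h : PySem.Chars.isspace c = false) :
    PySem.Chars.isspace (PySem.Chars.upperChar c) = false := by
  rw [PySem.Chars.upperChar]
  by_cases hl : PySem.Chars.islower c = true
  · simp only [hl, if_pos]
    have hb : 97 ≤ c.toNat ∧ c.toNat ≤ 122 := by
      simpa [PySem.Chars.islower] using hl
    have ht : (Char.ofNat (c.toNat - 32)).toNat = c.toNat - 32 :=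
      toNat_ofNat_ascii _ (by omega) (by omega)
    simp only [PySem.Chars.isspace, ht]
    simp only [Bool.or_eq_false_iff, Bool.and_eq_false_iff]
    refine ⟨⟨⟨⟨⟨⟨⟨⟨⟨⟨⟨?_, ?_⟩, ?_⟩, ?_⟩, ?_⟩, ?_⟩, ?_⟩, ?_⟩, ?_⟩, ?_⟩, ?_⟩, ?_⟩ <;>
      simp <;> omega
  · simp [hl, h]

lemma isspace_lowerChar (c : Char) (h : PySem.Chars.isspace c = false) :
    PySem.Chars.isspace (PySem.Chars.lowerChar c) = false := by
  rw [PySem.Chars.lowerChar]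
  by_cases hl : PySem.Chars.isupper c = true
  · simp only [hl, if_pos]
    have hb : 65 ≤ c.toNat ∧ c.toNat ≤ 90 := by
      simpa [PySem.Chars.isupper] using hl
    have ht : (Char.ofNat (c.toNat + 32)).toNat = c.toNat + 32 :=
      toNat_ofNat_ascii _ (by omega) (by omega)
    simp only [PySem.Chars.isspace, ht]
    simp only [Bool.or_eq_false_iff, Bool.and_eq_false_iff]
    refine ⟨⟨⟨⟨⟨⟨⟨⟨⟨⟨⟨?_, ?_⟩, ?_⟩, ?_⟩, ?_⟩, ?_⟩, ?_⟩, ?_⟩, ?_⟩, ?_⟩, ?_⟩, ?_⟩ <;>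
      simp <;> omega
  · simp [hl, h]

-- strip is a no-op on the capitalized result (non-space first and last characters)
lemma strip_pyCapitalize (h : Char) (r : List Char)
    (hh : PySem.Chars.isspace h = false)
    (hl : ∀ d, (h :: r).getLast? = some d → PySem.Chars.isspace d = false) :
    PySem.Chars.strip (pyCapitalize (h :: r)) = pyCapitalize (h :: r) := by
  simp only [pyCapitalize]
  rw [PySem.Chars.strip, lstrip_cons _ _ (isspace_upperChar h hh)]
  apply rstrip_eq_self
  intro d hd
  cases r with
  | nil =>
    simp [PySem.Chars.lower] at hd
    subst hd
    exact isspace_upperChar h hh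
  | cons x xs =>
    have hne : PySem.Chars.lower (x :: xs) ≠ [] := by simp [PySem.Chars.lower]
    rw [show PySem.Chars.upperChar h :: PySem.Chars.lower (x :: xs) =
          [PySem.Chars.upperChar h] ++ PySem.Chars.lower (x :: xs) from rfl,
        List.getLast?_append_of_ne_nil _ hne] at hd
    rw [PySem.Chars.lower, List.getLast?_map] at hd
    obtain ⟨e, he, rfl⟩ : ∃ e, (x :: xs).getLast? = some e ∧ PySem.Chars.lowerChar e = d := by
      cases hg : (x :: xs).getLast? with
      | none => simp [hg] at hd
      | some e => exact ⟨e, rfl, by simp [hg] at hd; exact hd⟩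
    have : PySem.Chars.isspace e = false := by
      apply hl
      rw [show h :: x :: xs = [h] ++ (x :: xs) from rfl,
          List.getLast?_append_of_ne_nil _ (by simp)]
      exact he
    exact isspace_lowerChar e this

-- the three sequential replaces end at B's punctuation predicate
lemma f3_eq_punctB (c : Char) :
    ((((fun _ => false) c || c == '?') || c == '.') || c == '!') = punctB c := by
  cases hq : c == '?' <;> cases hd : c == '.' <;> cases hb : c == '!' <;>
    simp [punctB, hq, hd, hb]

-- ===== main equivalence =====
lemma solve_eq_alt (s : String) : solve s = solve_alt s := by
  unfold solve solve_alt
  simp only [split₀_eq]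
  generalize s.toList = cs
  have hgood : good (mySplit cs []) := mySplit_good cs [] (by simp)
  -- A's join loop is a flatMap
  have hfold : (mySplit cs []).foldl (fun r x => r ++ x ++ [' ']) [] =
      (mySplit cs []).flatMap (fun t => t ++ [' ']) := by
    have h1 : (mySplit cs []).foldl (fun r x => r ++ x ++ [' ']) ([] : List Char) =
        (mySplit cs []).foldl (fun r x => r ++ (x ++ [' '])) ([] : List Char) := by
      apply PySem.List.foldl_congr_mem
      intro acc x _
      simp [List.append_assoc]
    rw [h1, PySem.List.foldl_append_eq_flatMap]
    simp
  rw [hfold, foldB_nil]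
  have hlead : lead cs = glueF punctB (mySplit cs []) := by
    have := glueF_mySplit cs []
    simp only [List.isEmpty_nil, if_pos] at this
    exact this.symm
  rw [hlead]
  cases htoks : mySplit cs [] with
  | nil =>
    simp [glueF, PySem.Chars.strip, PySem.Chars.lstrip, PySem.Chars.rstrip,
      replace_eq, myRep, PySem.Chars.endswith, List.isSuffixOf, List.isPrefixOf,
      pyCapitalize, PySem.Chars.lower]
    decide
  | cons t ts =>
    rw [← htoks]
    have htne : mySplit cs [] ≠ [] := by rw [htoks]; simp
    -- strip the joined string
    rw [flatMap_glue _ htne]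
    obtain ⟨l0, c0, hl0, hc0ns⟩ := glueF_last (fun _ => false) _ hgood htne
    obtain ⟨hh, t0, rfl⟩ : ∃ h t0, t = h :: t0 := by
      obtain ⟨htne', _⟩ := hgood t (by rw [htoks]; simp)
      cases t with
      | nil => exact absurd rfl htne'
      | cons a b => exact ⟨a, b, rfl⟩
    have hhns : PySem.Chars.isspace hh = false := by
      obtain ⟨_, hns⟩ := hgood (hh :: t0) (by rw [htoks]; simp)
      exact hns hh (by simp)
    have hheadA : glueF (fun _ => false) (mySplit cs []) =
        hh :: (t0 ++ gTail (fun _ => false) ts) := by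
      rw [htoks]; simp [glueF]
    have hstrip : PySem.Chars.strip (glueF (fun _ => false) (mySplit cs []) ++ [' ']) =
        glueF (fun _ => false) (mySplit cs []) := by
      rw [PySem.Chars.strip]
      rw [hheadA, List.cons_append, lstrip_cons _ _ hhns, ← List.cons_append, ← hheadA]
      rw [hl0, rstrip_concat_space _ _ hc0ns]
    rw [hstrip]
    -- the three replaces
    simp only [replace_eq]
    rw [myRep_glueF '?' (by decide) _ _ hgood]
    rw [myRep_glueF '.' (by decide) _ _ hgood]
    rw [myRep_glueF '!' (by decide) _ _ hgood]
    rw [glueF_congr _ _ punctB f3_eq_punctB]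
    -- terminal punctuation and capitalization
    obtain ⟨l1, d, hl1, hdns⟩ := glueF_last punctB _ hgood htne
    have hheadB : glueF punctB (mySplit cs []) = hh :: (t0 ++ gTail punctB ts) := by
      rw [htoks]; simp [glueF]
    have hG : l1 ++ [d] = hh :: (t0 ++ gTail punctB ts) := hl1.symm.trans hheadB
    rw [hl1]
    rw [endswith_concat, endswith_concat, endswith_concat]
    simp only [List.getLast?_concat]
    have hcomm : (('.' == d) || ('!' == d) || ('?' == d)) = (d == '.' || d == '!' || d == '?') := by
      by_cases e1 : d = '.'
      · subst e1; decide
      · by_cases e2 : d = '!'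
        · subst e2; decide
        · by_cases e3 : d = '?'
          · subst e3; decide
          · simp [beq_eq_false_iff_ne.mpr e1, beq_eq_false_iff_ne.mpr e2,
              beq_eq_false_iff_ne.mpr e3,
              beq_eq_false_iff_ne.mpr (fun h => e1 h.symm),
              beq_eq_false_iff_ne.mpr (fun h => e2 h.symm),
              beq_eq_false_iff_ne.mpr (fun h => e3 h.symm)]
    rw [hcomm]
    by_cases hp : (d == '.' || d == '!' || d == '?') = true
    · rw [if_neg (show ¬((!(d == '.' || d == '!' || d == '?')) = true) by rw [hp]; decide)]
      rw [if_pos hp]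
      rw [hG]
      have hlast : ∀ e, (hh :: (t0 ++ gTail punctB ts)).getLast? = some e →
          PySem.Chars.isspace e = false := by
        intro e he
        rw [← hG, List.getLast?_concat] at he
        cases he
        exact hdns
      rw [strip_pyCapitalize hh _ hhns hlast]
      rfl
    · have hp' : (d == '.' || d == '!' || d == '?') = false := Bool.eq_false_iff.mpr hp
      rw [if_pos (show (!(d == '.' || d == '!' || d == '?')) = true by rw [hp']; decide)]
      rw [if_neg hp]
      rw [hG, List.cons_append]
      have hlast : ∀ e, (hh :: ((t0 ++ gTail punctB ts) ++ ['.'])).getLast? = some e →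
          PySem.Chars.isspace e = false := by
        intro e he
        rw [← List.cons_append, List.getLast?_concat] at he
        cases he
        decide
      rw [strip_pyCapitalize hh _ hhns hlast]
      rfl

-- ===== VERDICT (by name: the statement is the Claim_ definition above) =====
theorem solve_spec : Claim_equal_solve := by
  unfold Claim_equal_solve
  intro s _
  unfold Spec_solve
  exact solve_eq_alt s
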